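-- pv_equiv track=rewrite | github.com/hamedazad/memora | memory_assistant/recommendation_service.py | _generate_content_suggestions
-- ===== SOURCE A (Python) =====
-- from typing import List, Dict, Any, Tuple
--
-- def _generate_content_suggestions(patterns: Dict) -> List[Dict[str, str]]:
--     """Generate content suggestions based on user patterns"""
--     suggestions = []
--
--     # Suggest based on favorite types
--     for memory_type in patterns['favorite_types']:
--         if memory_type == 'work':
--             suggestions.append({
--                 'type': 'work',
--                 'title': 'Work Progress Update',
--                 'description': 'Track your current work projects and achievements'
--             })
--         elif memory_type == 'learning':
--             suggestions.append({
--                 'type': 'learning',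
--                 'title': 'Learning Insight',
--                 'description': 'Document something new you learned today'
--             })
--         elif memory_type == 'personal':
--             suggestions.append({
--                 'type': 'personal',
--                 'title': 'Personal Reflection',
--                 'description': 'Reflect on your personal growth or experiences'
--             })
--
--     # Suggest based on common tags
--     for tag in patterns['common_tags'][:3]:
--         suggestions.append({
--             'type': 'tagged',
--             'title': f'Update on {tag.title()}',
--             'description': f'Share progress or thoughts about {tag}'
--         })
--
--     return suggestions[:5]  # Limit to 5 suggestions
-- ===== SOURCE B (Python) =====
-- def _template(memory_type):
--     if memory_type == 'work':
--         return {
--             'type': 'work',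
--             'title': 'Work Progress Update',
--             'description': 'Track your current work projects and achievements',
--         }
--     if memory_type == 'learning':
--         return {
--             'type': 'learning',
--             'title': 'Learning Insight',
--             'description': 'Document something new you learned today',
--         }
--     if memory_type == 'personal':
--         return {
--             'type': 'personal',
--             'title': 'Personal Reflection',
--             'description': 'Reflect on your personal growth or experiences',
--         }
--     return None
--
--
-- def _emit(types, tags, budget, tag_budget):
--     """Stream suggestions with a remaining-output budget; stops as soon as it is spent."""
--     if budget == 0:
--         return []
--     if types:
--         s = _template(types[0])
--         if s is None:
--             return _emit(types[1:], tags, budget, tag_budget)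
--         return [s] + _emit(types[1:], tags, budget - 1, tag_budget)
--     if tags and tag_budget > 0:
--         tag = tags[0]
--         s = {
--             'type': 'tagged',
--             'title': f'Update on {tag.title()}',
--             'description': f'Share progress or thoughts about {tag}',
--         }
--         return [s] + _emit([], tags[1:], budget - 1, tag_budget - 1)
--     return []
--
--
-- def _generate_content_suggestions(patterns):
--     """Generate content suggestions based on user patterns"""
--     return _emit(list(patterns['favorite_types']), list(patterns['common_tags']), 5, 3)
-- ===== Notes on version B (the rewrite author's own statement) =====
-- stated objective: alternative
-- what changed: Replaces A's build-everything-then-slice accumulation (append loop over all types, append loop over tags[:3], final [:5]) by a single budgeted recursion that streams suggestions and terminates as soon as the 5-item output budget (and 3-item tag budget) is spent, never constructing suggestions beyond the limit.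
import Mathlib
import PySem

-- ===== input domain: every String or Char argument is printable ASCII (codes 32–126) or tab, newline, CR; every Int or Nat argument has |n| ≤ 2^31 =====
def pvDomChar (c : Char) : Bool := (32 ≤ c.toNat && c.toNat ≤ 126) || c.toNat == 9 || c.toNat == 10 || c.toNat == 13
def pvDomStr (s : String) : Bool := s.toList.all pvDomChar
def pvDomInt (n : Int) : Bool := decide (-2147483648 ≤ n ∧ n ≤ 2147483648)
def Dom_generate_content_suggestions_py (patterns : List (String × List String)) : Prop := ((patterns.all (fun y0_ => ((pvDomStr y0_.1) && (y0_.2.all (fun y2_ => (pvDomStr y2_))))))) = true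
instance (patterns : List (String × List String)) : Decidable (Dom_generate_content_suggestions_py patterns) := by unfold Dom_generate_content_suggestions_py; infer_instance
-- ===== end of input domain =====

-- B replaces A's build-all-then-slice accumulation by a single budgeted recursion
-- that streams at most 5 suggestions (at most 3 tag ones) and stops when the budget
-- is spent (alternative decomposition, same asymptotic cost).

-- Shared builtin helpers (ports of Python builtins / f-strings, used by both sides).
-- Hand port of str.title(): exact on ASCII, where Python's "cased" = isalpha.
def pyTitleChars : List Char → Bool → List Char
  | [], _ => []
  | c :: cs, prevAlpha =>
    (if PySem.Chars.isalpha c then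
       (if prevAlpha then PySem.Chars.lowerChar c else PySem.Chars.upperChar c)
     else c) :: pyTitleChars cs (PySem.Chars.isalpha c)

-- f'Update on {tag.title()}' / f'Share progress or thoughts about {tag}'
def mkTagTitle (tag : String) : String :=
  String.ofList ("Update on ".toList ++ pyTitleChars tag.toList false)
def mkTagDesc (tag : String) : String :=
  String.ofList ("Share progress or thoughts about ".toList ++ tag.toList)

-- ===== PORT A =====
def workSuggA : List (String × String) :=
  [("type", "work"), ("title", "Work Progress Update"),
   ("description", "Track your current work projects and achievements")]
def learnSuggA : List (String × String) :=
  [("type", "learning"), ("title", "Learning Insight"),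
   ("description", "Document something new you learned today")]
def persSuggA : List (String × String) :=
  [("type", "personal"), ("title", "Personal Reflection"),
   ("description", "Reflect on your personal growth or experiences")]

def generate_content_suggestions_py (patterns : List (String × List String)) : List (List (String × String)) :=
  match patterns.lookup "favorite_types", patterns.lookup "common_tags" with
  | some fav, some tags =>
    let suggestions := fav.foldl (fun acc memory_type =>
      if memory_type == "work" then acc ++ [workSuggA]
      else if memory_type == "learning" then acc ++ [learnSuggA]
      else if memory_type == "personal" then acc ++ [persSuggA]
      else acc) []
    let suggestions := (PySem.List.slice tags none (some 3)).foldl (fun acc tag =>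
      acc ++ [[("type", "tagged"), ("title", mkTagTitle tag), ("description", mkTagDesc tag)]])
      suggestions
    suggestions.take 5
  | _, _ => []  -- KeyError in Python; excluded by Pre_

-- ===== PORT B =====
-- _template: the if-chain returning an Option
def templateB (memory_type : String) : Option (List (String × String)) :=
  if memory_type == "work" then
    some [("type", "work"), ("title", "Work Progress Update"),
          ("description", "Track your current work projects and achievements")]
  else if memory_type == "learning" then
    some [("type", "learning"), ("title", "Learning Insight"),
          ("description", "Document something new you learned today")]
  else if memory_type == "personal" then
    some [("type", "personal"), ("title", "Personal Reflection"),
          ("description", "Reflect on your personal growth or experiences")]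
  else none

-- _emit: budgeted streaming recursion (budget = remaining output slots, tag_budget = remaining tag slots)
def emitB : List String → List String → Nat → Nat → List (List (String × String))
  | _, _, 0, _ => []
  | t :: rest, tags, Nat.succ b, tb =>
      match templateB t with
      | none => emitB rest tags (Nat.succ b) tb
      | some s => s :: emitB rest tags b tb
  | [], tag :: rest, Nat.succ b, Nat.succ tb =>
      [("type", "tagged"), ("title", mkTagTitle tag), ("description", mkTagDesc tag)]
        :: emitB [] rest b tb
  | [], _, _, _ => []
termination_by ts tags _ _ => ts.length + tags.length

def generate_content_suggestions_py_alt (patterns : List (String × List String)) : List (List (String × String)) :=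
  (((patterns.lookup "favorite_types").bind (fun fav =>
    (patterns.lookup "common_tags").map (fun tags =>
      emitB fav tags 5 3)))).getD []  -- a missing key is a KeyError in Python; excluded by Pre_

-- ===== PRECONDITION & SPEC =====
-- Python raises KeyError unless both 'favorite_types' and 'common_tags' are keys of patterns.
def Pre_generate_content_suggestions_py (patterns : List (String × List String)) : Prop :=
  (patterns.lookup "favorite_types").isSome = true ∧ (patterns.lookup "common_tags").isSome = true
instance (patterns : List (String × List String)) : Decidable (Pre_generate_content_suggestions_py patterns) := by unfold Pre_generate_content_suggestions_py; infer_instance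

def pvWitness_generate_content_suggestions_py : (List (String × List String)) :=
  [("favorite_types", ["work", "x"]), ("common_tags", ["python", "ai"])]

def Spec_generate_content_suggestions_py (patterns : List (String × List String)) (out : List (List (String × String))) : Prop := out = generate_content_suggestions_py_alt patterns
instance (patterns : List (String × List String)) (out : List (List (String × String))) : Decidable (Spec_generate_content_suggestions_py patterns out) := by unfold Spec_generate_content_suggestions_py; infer_instance

-- ===== CLAIM (what is proved, stated in full; the proofs are below) =====
def Claim_equal_generate_content_suggestions_py : Prop := ∀ (patterns : List (String × List String)), Dom_generate_content_suggestions_py patterns → Pre_generate_content_suggestions_py patterns → Spec_generate_content_suggestions_py patterns (generate_content_suggestions_py patterns)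

-- ===== LEMMAS AND PROOFS =====

-- The tag suggestion built in both loops.
def tagSugg (tag : String) : List (String × String) :=
  [("type", "tagged"), ("title", mkTagTitle tag), ("description", mkTagDesc tag)]

-- A's per-element contribution in the type loop equals B's _template result.
theorem typeStep_eq (t : String) :
    (if t == "work" then [workSuggA]
     else if t == "learning" then [learnSuggA]
     else if t == "personal" then [persSuggA]
     else []) = (templateB t).toList := by
  unfold templateB workSuggA learnSuggA persSuggA
  split_ifs <;> simp

-- A's type loop, as appending the flattened per-element contributions.
theorem foldlA (xs : List String) (init : List (List (String × String))) :
    xs.foldl (fun acc memory_type =>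
      if memory_type == "work" then acc ++ [workSuggA]
      else if memory_type == "learning" then acc ++ [learnSuggA]
      else if memory_type == "personal" then acc ++ [persSuggA]
      else acc) init
    = init ++ xs.flatMap (fun t => (templateB t).toList) := by
  induction xs generalizing init with
  | nil => simp
  | cons x xs ih =>
    rw [List.foldl_cons, ih, List.flatMap_cons, ← List.append_assoc]
    congr 1
    rw [← typeStep_eq x]
    split_ifs <;> simp

-- A's tag loop, as appending the mapped suggestions.
theorem foldlTag (xs : List String) (init : List (List (String × String))) :
    xs.foldl (fun acc tag =>
      acc ++ [[("type", "tagged"), ("title", mkTagTitle tag), ("description", mkTagDesc tag)]]) init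
    = init ++ xs.map tagSugg := by
  induction xs generalizing init with
  | nil => simp
  | cons x xs ih => simp [List.foldl_cons, ih, tagSugg]

-- The tag-only phase of B's recursion is take-then-map-then-take.
theorem emitB_nil (tags : List String) (b tb : Nat) :
    emitB [] tags b tb = ((tags.take tb).map tagSugg).take b := by
  induction tags generalizing b tb with
  | nil => cases b <;> cases tb <;> simp [emitB]
  | cons t rest ih =>
    cases b with
    | zero => simp [emitB]
    | succ b =>
      cases tb with
      | zero => simp [emitB]
      | succ tb => simp [emitB, tagSugg, ih]

-- B's budgeted recursion computes A's build-then-slice result.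
theorem emitB_eq (types tags : List String) (b tb : Nat) :
    emitB types tags b tb
    = ((types.flatMap (fun t => (templateB t).toList)) ++ (tags.take tb).map tagSugg).take b := by
  induction types generalizing b with
  | nil => simp [emitB_nil]
  | cons t rest ih =>
    cases b with
    | zero => simp [emitB]
    | succ b =>
      cases h : templateB t with
      | none => simp [emitB, h, ih]
      | some s => simp [emitB, h, ih]

theorem generate_content_suggestions_py_spec : Claim_equal_generate_content_suggestions_py := by
  unfold Claim_equal_generate_content_suggestions_py
  intro patterns _ hpre
  unfold Spec_generate_content_suggestions_py
  unfold generate_content_suggestions_py generate_content_suggestions_py_alt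
  obtain ⟨h1, h2⟩ := hpre
  obtain ⟨fav, hf⟩ := Option.isSome_iff_exists.mp h1
  obtain ⟨tags, ht⟩ := Option.isSome_iff_exists.mp h2
  rw [hf, ht]
  simp only [Option.bind_some, Option.map_some, Option.getD_some]
  rw [emitB_eq, foldlA, foldlTag, List.nil_append]
  norm_num [PySem.List.slice_to]
  rfl
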